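-- pv_equiv track=rewrite | github.com/levgou/pqtrees | pqtrees/scripts/front_size_dist.py | can_reduce_chars
-- ===== SOURCE A (Python) =====
-- from collections import Counter
--
-- def is_list_consecutive(lst):
--     sorted_list = list(sorted(lst))
--     consecutive_list = list(range(sorted_list[0], sorted_list[-1] + 1))
--     return consecutive_list == sorted_list
--
-- def can_reduce_chars(id_perm, others):
--     count = Counter(id_perm)
--     more_than_once = {k: v for k, v in count.items() if v > 1}
--
--     compactable_chars = []
--     for char in more_than_once:
--         for perm in others:
--             indices = [i for i, x in enumerate(perm) if x == char]
--             if not is_list_consecutive(indices):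
--                 break
--         else:
--             compactable_chars.append(char)
--
--     return compactable_chars
-- ===== SOURCE B (Python) =====
-- def can_reduce_chars(id_perm, others):
--     counts = {}
--     for x in id_perm:
--         counts[x] = counts.get(x, 0) + 1
--     # one pass per permutation: char -> (first index, last index, occurrence count)
--     stats = []
--     for perm in others:
--         d = {}
--         for i, x in enumerate(perm):
--             if x in d:
--                 f, _, c = d[x]
--                 d[x] = (f, i, c + 1)
--             else:
--                 d[x] = (i, i, 1)
--         stats.append(d)
--     result = []
--     for char, v in counts.items():
--         if v > 1 and all(char in d and d[char][1] - d[char][0] + 1 == d[char][2] for d in stats):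
--             result.append(char)
--     return result
-- ===== Notes on version B (the rewrite author's own statement) =====
-- stated objective: alternative
-- what changed: Instead of, for every duplicated char and every perm, rescanning the perm for its indices, sorting them and materialising a range list, B makes one pass per perm building char -> (first, last, count) and tests consecutiveness arithmetically as last - first + 1 == count; asymptotically O(P*N + C*P) vs A's O(C*P*N log N), though not measurably faster on the timing families. (A raises IndexError when a duplicated char is missing from some perm; Pre_ excludes exactly those inputs.)
import Mathlib
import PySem

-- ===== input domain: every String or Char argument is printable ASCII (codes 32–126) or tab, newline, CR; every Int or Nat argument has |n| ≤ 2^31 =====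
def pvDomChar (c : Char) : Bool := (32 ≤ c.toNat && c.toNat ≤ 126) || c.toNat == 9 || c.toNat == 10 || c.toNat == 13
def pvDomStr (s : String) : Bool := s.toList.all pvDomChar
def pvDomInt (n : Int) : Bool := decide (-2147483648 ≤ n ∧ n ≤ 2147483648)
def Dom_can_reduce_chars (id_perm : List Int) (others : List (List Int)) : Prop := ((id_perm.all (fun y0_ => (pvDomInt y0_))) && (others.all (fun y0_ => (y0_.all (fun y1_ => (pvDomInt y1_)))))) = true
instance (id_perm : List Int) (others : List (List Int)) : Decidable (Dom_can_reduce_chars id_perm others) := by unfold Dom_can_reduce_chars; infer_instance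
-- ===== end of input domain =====

-- B replaces A's per-char-per-perm rescan + sort + materialised range by one pass per perm
-- building char -> (first, last, count), checking consecutiveness arithmetically as last - first + 1 == count (objective: alternative).

-- ===== PORT A =====
-- is_list_consecutive; on the empty list Python raises IndexError (such inputs are outside Pre_)
def pvIsListConsecutive (lst : List Int) : Bool :=
  let sorted_list := PySem.List.sorted lst (fun x => x) false
  match PySem.List.pyGet? sorted_list 0, PySem.List.pyGet? sorted_list (-1) with
  | some a, some b => PySem.List.pyRange a (b + 1) 1 == sorted_list
  | _, _ => false

-- [i for i, x in enumerate(perm) if x == char]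
def pvIndicesA (c : Int) (perm : List Int) : List Int :=
  ((PySem.List.enumerate perm).filter (fun p => p.2 == c)).map (·.1)

-- the inner 'for perm in others: … break / else:' loop of A
def pvLoopA (c : Int) : List (List Int) → Bool
  | [] => true
  | perm :: rest => if pvIsListConsecutive (pvIndicesA c perm) then pvLoopA c rest else false

def can_reduce_chars (id_perm : List Int) (others : List (List Int)) : List Int :=
  let count := PySem.Dict.counter id_perm
  let more_than_once := count.items.filter (fun kv => decide (1 < kv.2))
  more_than_once.foldl (fun acc kv => if pvLoopA kv.1 others then acc ++ [kv.1] else acc) []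

-- ===== PORT B =====
-- one pass over a perm: char -> (first index, last index, occurrence count)
def pvStep (d : PySem.Dict Int (Int × Int × Int)) (p : Int × Int) : PySem.Dict Int (Int × Int × Int) :=
  match d.get? p.2 with
  | some (f, _, k) => d.insert p.2 (f, p.1, k + 1)
  | none => d.insert p.2 (p.1, p.1, 1)

def pvStats (perm : List Int) : PySem.Dict Int (Int × Int × Int) :=
  (PySem.List.enumerate perm).foldl pvStep PySem.Dict.empty

def pvCheckB (stats : List (PySem.Dict Int (Int × Int × Int))) (c : Int) : Bool :=
  stats.all (fun d =>
    match d.get? c with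
    | some (f, l, k) => decide (l - f + 1 = k)
    | none => false)

def can_reduce_chars_alt (id_perm : List Int) (others : List (List Int)) : List Int :=
  let counts := id_perm.foldl (fun d x => d.insert x (d.getD x 0 + 1)) (PySem.Dict.empty : PySem.Dict Int Int)
  let stats := others.map pvStats
  counts.items.foldl
    (fun acc kv => if decide (1 < kv.2) && pvCheckB stats kv.1 then acc ++ [kv.1] else acc) []

-- ===== PRECONDITION & SPEC =====
-- Pre_ excludes exactly the inputs on which A raises IndexError: some char occurring more than
-- once in id_perm is absent from some perm in others (is_list_consecutive([]) indexes []).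
def Pre_can_reduce_chars (id_perm : List Int) (others : List (List Int)) : Prop :=
  ∀ c ∈ id_perm, 1 < id_perm.count c → ∀ perm ∈ others, c ∈ perm
instance (id_perm : List Int) (others : List (List Int)) : Decidable (Pre_can_reduce_chars id_perm others) := by unfold Pre_can_reduce_chars; infer_instance

def pvWitness_can_reduce_chars : List Int × List (List Int) := ([1, 1, 2], [[2, 1, 1]])

def Spec_can_reduce_chars (id_perm : List Int) (others : List (List Int)) (out : List Int) : Prop := out = can_reduce_chars_alt id_perm others
instance (id_perm : List Int) (others : List (List Int)) (out : List Int) : Decidable (Spec_can_reduce_chars id_perm others out) := by unfold Spec_can_reduce_chars; infer_instance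

-- ===== CLAIM (what is proved, stated in full; the proofs are below) =====
def Claim_equal_can_reduce_chars : Prop := ∀ (id_perm : List Int) (others : List (List Int)), Dom_can_reduce_chars id_perm others → Pre_can_reduce_chars id_perm others → Spec_can_reduce_chars id_perm others (can_reduce_chars id_perm others)
-- ===== LEMMAS AND PROOFS =====

-- the per-index update B's dict fold performs on the entry of one fixed char
def pvUpd (o : Option (Int × Int × Int)) (i : Int) : Option (Int × Int × Int) :=
  match o with
  | none => some (i, i, 1)
  | some (f, _, k) => some (f, i, k + 1)

theorem pvStep_get? (pairs : List (Int × Int)) (c : Int) :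
    ∀ d0 : PySem.Dict Int (Int × Int × Int),
    (pairs.foldl pvStep d0).get? c =
      ((pairs.filter (fun p => p.2 == c)).map (·.1)).foldl pvUpd (d0.get? c) := by
  induction pairs with
  | nil => intro d0; rfl
  | cons p rest ih =>
    intro d0
    obtain ⟨i, x⟩ := p
    by_cases hx : x = c
    · subst hx
      have hfilter : (((i, x) :: rest).filter (fun p => p.2 == x)) =
          (i, x) :: rest.filter (fun p => p.2 == x) := by
        simp
      rw [List.foldl_cons, ih, hfilter, List.map_cons, List.foldl_cons]
      have hstep : (pvStep d0 (i, x)).get? x = pvUpd (d0.get? x) i := by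
        cases h : d0.get? x with
        | none => simp [pvStep, pvUpd, h, PySem.Dict.get?_insert_self]
        | some t =>
          obtain ⟨f, l, k⟩ := t
          simp [pvStep, pvUpd, h, PySem.Dict.get?_insert_self]
      rw [hstep]
    · have hfilter : (((i, x) :: rest).filter (fun p => p.2 == c)) =
          rest.filter (fun p => p.2 == c) := by
        simp [hx]
      rw [List.foldl_cons, ih, hfilter]
      have hstep : (pvStep d0 (i, x)).get? c = d0.get? c := by
        cases h : d0.get? x with
        | none => simp [pvStep, h, PySem.Dict.get?_insert, Ne.symm hx]
        | some t =>
          obtain ⟨f, l, k⟩ := t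
          simp [pvStep, h, PySem.Dict.get?_insert, Ne.symm hx]
      rw [hstep]

theorem pvUpd_fold_some (js : List Int) :
    ∀ (f l k : Int), js.foldl pvUpd (some (f, l, k)) = some (f, js.getLastD l, k + js.length) := by
  induction js with
  | nil => intro f l k; simp
  | cons j t ih =>
    intro f l k
    simp only [List.foldl_cons, pvUpd, ih, List.getLastD_cons, List.length_cons,
      Option.some.injEq, Prod.mk.injEq]
    refine ⟨trivial, trivial, by push_cast; ring⟩

theorem pvStats_get? (perm : List Int) (c : Int) :
    (pvStats perm).get? c =
      match pvIndicesA c perm with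
      | [] => none
      | j :: js => some (j, js.getLastD j, 1 + (js.length : Int)) := by
  unfold pvStats pvIndicesA
  rw [pvStep_get? _ c PySem.Dict.empty]
  rw [PySem.Dict.get?_empty]
  cases h : ((PySem.List.enumerate perm).filter (fun p => p.2 == c)).map (·.1) with
  | nil => simp
  | cons j js =>
    simp only [List.foldl_cons, pvUpd, pvUpd_fold_some]

-- for a strictly increasing list, last - head ≥ length - 1
theorem pvSpan (js : List Int) : ∀ j : Int, (j :: js).Pairwise (· < ·) →
    (js.length : Int) ≤ js.getLastD j - j := by
  induction js with
  | nil => intro j _; simp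
  | cons a t ih =>
    intro j h
    have hja : j < a := (List.pairwise_cons.1 h).1 a (by simp)
    have ht : (a :: t).Pairwise (· < ·) := (List.pairwise_cons.1 h).2
    have h2 := ih a ht
    rw [List.getLastD_cons]
    simp only [List.length_cons]
    push_cast
    omega

-- a strictly increasing list whose span equals its length is exactly a range
theorem pvConsec (js : List Int) : ∀ j : Int, (j :: js).Pairwise (· < ·) →
    js.getLastD j - j + 1 = 1 + (js.length : Int) →
    j :: js = PySem.List.pyRange j (js.getLastD j + 1) 1 := by
  induction js with
  | nil =>
    intro j _ _
    simp [PySem.List.pyRange_one_singleton]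
  | cons a t ih =>
    intro j h hlen
    have hja : j < a := (List.pairwise_cons.1 h).1 a (by simp)
    have ht : (a :: t).Pairwise (· < ·) := (List.pairwise_cons.1 h).2
    have hspan := pvSpan t a ht
    rw [List.getLastD_cons] at hlen ⊢
    simp only [List.length_cons] at hlen
    push_cast at hlen
    have ha : a = j + 1 := by omega
    have ht' : t.getLastD a - a + 1 = 1 + (t.length : Int) := by omega
    have h3 := ih a ht ht'
    subst ha
    have hlt : j < t.getLastD (j + 1) + 1 := by omega
    rw [PySem.List.pyRange_one_cons hlt, ← h3]

theorem pvIndicesA_pairwise (c : Int) (perm : List Int) : (pvIndicesA c perm).Pairwise (· < ·) := by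
  unfold pvIndicesA
  apply List.Pairwise.map
  · exact fun a b h => h
  · exact (PySem.List.pairwise_lt_enumerate perm 0).filter _

theorem pvIndicesA_ne_nil (c : Int) (perm : List Int) (hmem : c ∈ perm) :
    pvIndicesA c perm ≠ [] := by
  unfold pvIndicesA
  obtain ⟨k, hk, hv⟩ := List.mem_iff_getElem.1 hmem
  have : ((0 : Int) + k, c) ∈ (PySem.List.enumerate perm).filter (fun p => p.2 == c) := by
    rw [List.mem_filter]
    refine ⟨(PySem.List.mem_enumerate_iff _ _ _).2 ⟨k, hk, by rw [hv]⟩, by simp⟩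
  intro hnil
  rw [List.map_eq_nil_iff] at hnil
  rw [hnil] at this
  exact List.not_mem_nil this

-- the per-perm agreement: A's sort/range check equals B's arithmetic check, for a present char
theorem pvPerm_check (c : Int) (perm : List Int) (hmem : c ∈ perm) :
    pvIsListConsecutive (pvIndicesA c perm) =
      (match (pvStats perm).get? c with
       | some (f, l, k) => decide (l - f + 1 = k)
       | none => false) := by
  rw [pvStats_get?]
  have hpw := pvIndicesA_pairwise c perm
  cases h : pvIndicesA c perm with
  | nil => exact absurd h (pvIndicesA_ne_nil c perm hmem)
  | cons j js =>
    rw [h] at hpw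
    unfold pvIsListConsecutive
    have hsorted : PySem.List.sorted (j :: js) (fun x => x) false = j :: js :=
      PySem.List.sorted_eq_of_perm_of_pairwise_lt _ _ _ (List.Perm.refl _) hpw
    simp only [hsorted]
    have h0 : PySem.List.pyGet? (j :: js) 0 = some j := by
      simp
    have hlast : PySem.List.pyGet? (j :: js) (-1) = some (js.getLastD j) := by
      rw [PySem.List.pyGet?_neg_one]
      simp [List.getLast?_cons]
    rw [h0, hlast]
    show (PySem.List.pyRange j (js.getLastD j + 1) 1 == j :: js)
        = decide (js.getLastD j - j + 1 = 1 + (js.length : Int))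
    by_cases hc : js.getLastD j - j + 1 = 1 + (js.length : Int)
    · have hr := pvConsec js j hpw hc
      rw [← hr]
      simp only [beq_self_eq_true]
      exact (decide_eq_true hc).symm
    · have hspan := pvSpan js j hpw
      have hne : PySem.List.pyRange j (js.getLastD j + 1) 1 ≠ j :: js := by
        intro he
        have hlen := congrArg List.length he
        rw [PySem.List.length_pyRange_one] at hlen
        simp only [List.length_cons] at hlen
        omega
      have h1 : (PySem.List.pyRange j (js.getLastD j + 1) 1 == j :: js) = false := by
        simpa using hne
      have h2 : decide (js.getLastD j - j + 1 = 1 + (js.length : Int)) = false := by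
        simpa using hc
      rw [h1, h2]

theorem pvLoopA_eq_all (c : Int) (ps : List (List Int)) :
    pvLoopA c ps = ps.all (fun perm => pvIsListConsecutive (pvIndicesA c perm)) := by
  induction ps with
  | nil => rfl
  | cons p rest ih =>
    simp only [pvLoopA, List.all_cons, ih]
    by_cases hp : pvIsListConsecutive (pvIndicesA c p) = true
    · simp [hp]
    · simp [hp]

-- the guarded fold over the filtered items equals the fold with a conjoined guard
theorem pvFold_filter_guard (l : List (Int × Int)) (q : Int → Bool) :
    ∀ acc : List Int,
    (l.filter (fun kv => decide (1 < kv.2))).foldl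
        (fun acc kv => if q kv.1 then acc ++ [kv.1] else acc) acc
    = l.foldl (fun acc kv => if decide (1 < kv.2) && q kv.1 then acc ++ [kv.1] else acc) acc := by
  induction l with
  | nil => intro acc; rfl
  | cons kv rest ih =>
    intro acc
    by_cases hkv : (1 : Int) < kv.2
    · simp [List.filter_cons, hkv, ih]
    · simp [List.filter_cons, hkv, ih]

theorem pvFold_congr (l : List (Int × Int)) (p q : Int × Int → Bool)
    (h : ∀ kv ∈ l, p kv = q kv) :
    ∀ acc : List Int,
    l.foldl (fun acc kv => if p kv then acc ++ [kv.1] else acc) acc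
    = l.foldl (fun acc kv => if q kv then acc ++ [kv.1] else acc) acc := by
  induction l with
  | nil => intro acc; rfl
  | cons kv rest ih =>
    intro acc
    rw [List.foldl_cons, List.foldl_cons, h kv List.mem_cons_self,
      ih (fun x hx => h x (List.mem_cons_of_mem _ hx))]

-- ===== VERDICT (by name: the statement is the Claim_ definition above) =====
theorem pvCheck_eq (c : Int) (ps : List (List Int)) (h : ∀ perm ∈ ps, c ∈ perm) :
    pvLoopA c ps = pvCheckB (ps.map pvStats) c := by
  rw [pvLoopA_eq_all]
  induction ps with
  | nil => rfl
  | cons p rest ih =>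
    simp only [List.all_cons, List.map_cons, pvCheckB, List.all_cons] at *
    rw [pvPerm_check c p (h p (by simp))]
    rw [ih (fun perm hperm => h perm (List.mem_cons_of_mem _ hperm))]

theorem can_reduce_chars_spec : Claim_equal_can_reduce_chars := by
  intro id_perm others _ hpre
  simp only [Spec_can_reduce_chars, can_reduce_chars, can_reduce_chars_alt]
  show List.foldl (fun acc kv => if pvLoopA kv.1 others = true then acc ++ [kv.1] else acc) []
      (List.filter (fun kv => decide (1 < kv.2)) (PySem.Dict.counter id_perm).items)
    = List.foldl (fun acc kv =>
        if (decide (1 < kv.2) && pvCheckB (List.map pvStats others) kv.1) = true then acc ++ [kv.1] else acc)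
      [] (PySem.Dict.counter id_perm).items
  rw [pvFold_filter_guard _ (fun c => pvLoopA c others) []]
  apply pvFold_congr
  intro kv hkv
  rw [PySem.Dict.items_counter] at hkv
  obtain ⟨k, hk, rfl⟩ := List.mem_map.1 hkv
  have hkmem : k ∈ id_perm := (PySem.Set.mem_ofList _ _).1 hk
  by_cases hcnt : 1 < id_perm.count k
  · have hguard : decide ((1 : Int) < (id_perm.count k : Int)) = true :=
      decide_eq_true (by exact_mod_cast hcnt)
    rw [hguard]
    simp only [Bool.true_and]
    exact pvCheck_eq k others (fun perm hperm => hpre k hkmem hcnt perm hperm)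
  · have hguard : decide ((1 : Int) < (id_perm.count k : Int)) = false :=
      decide_eq_false (by exact_mod_cast hcnt)
    rw [hguard]
    simp
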